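-- pv_equiv track=rewrite | github.com/chuoer47/AlgorithmLearning | ACwing算法提高课/第六章-基础算法/递推与递归/98. 分形之城.py | calXY
-- ===== SOURCE A (Python) =====
-- def calXY(level, n):
--     """
--     level:地图等级
--     n:第几个数
--     """
--     if level == 0:
--         return (0, 0)
--     pre_level = level - 1
--     pre_length = (1 << pre_level)
--     pre_area = pre_length * pre_length
--     # 根据px,py获得当前的x,y
--     px, py = calXY(pre_level, n % pre_area)  # 获得上一个等级的坐标点
--     case = n // pre_area
--     x, y = px, py
--     if case == 0:
--         x, y = py, px
--     elif case == 1: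
--         x, y = px, py + pre_length
--     elif case == 2:
--         x, y = px + pre_length, py + pre_length
--     else:
--         x, y = 2 * pre_length - py - 1, pre_length - px - 1  # 这里减一忘记了，debug了贼久，烦躁！
--     return (x, y)
-- ===== SOURCE B (Python) =====
-- def calXY(level, n):
--     # bottom-up iterative version: peel base-4 digits of n from the least
--     # significant end; only the top level's "digit" (the full quotient) may
--     # fall outside 0..3, exactly as in the recursion.
--     x, y = 0, 0
--     for k in range(1, level + 1):
--         length = 1 << (k - 1)
--         area = length * length
--         case = n // area
--         if k < level:
--             case %= 4
--         if case == 0: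
--             x, y = y, x
--         elif case == 1:
--             x, y = x, y + length
--         elif case == 2:
--             x, y = x + length, y + length
--         else:
--             x, y = 2 * length - y - 1, length - x - 1
--     return (x, y)
-- ===== Notes on version B (the rewrite author's own statement) =====
-- stated objective: alternative
-- what changed: Replaces A's top-down recursion on level by a single bottom-up loop that reads the base-4 digits of n directly (n // 4**(k-1) % 4 per inner level, the raw quotient at the top level), applying each level's transform iteratively instead of through nested recursive calls and remainders.
-- outside the precondition, e.g. on calXY(-1, 0): A raises ValueError, B returns (0, 0)
import Mathlib
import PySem

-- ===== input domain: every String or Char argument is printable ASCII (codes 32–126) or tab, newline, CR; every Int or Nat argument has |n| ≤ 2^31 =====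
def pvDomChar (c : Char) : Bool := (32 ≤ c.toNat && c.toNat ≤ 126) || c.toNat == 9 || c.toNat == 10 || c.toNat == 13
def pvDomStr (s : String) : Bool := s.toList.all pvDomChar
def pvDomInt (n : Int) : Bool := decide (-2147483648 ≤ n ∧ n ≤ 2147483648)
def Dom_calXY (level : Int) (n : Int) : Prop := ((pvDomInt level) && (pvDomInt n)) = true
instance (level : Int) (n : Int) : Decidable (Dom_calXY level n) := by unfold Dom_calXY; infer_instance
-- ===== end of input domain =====

-- B replaces A's top-down recursion by one bottom-up loop over the base-4 digits of n (alternative decomposition, same cost).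

-- ===== PORT A =====
-- A recurses on `level`; ported as structural recursion on the Nat value of `level`
-- (faithful for level ≥ 0; for level < 0 Python raises ValueError on 1 << (level-1), excluded by Pre_).
def calXY_go : Nat → Int → Int × Int
  | 0, _ => (0, 0)
  | l + 1, n =>
      let pre_length : Int := 1 <<< l            -- 1 << pre_level
      let pre_area := pre_length * pre_length
      let p := calXY_go l (PySem.Int.mod n pre_area)
      let «case» := PySem.Int.floordiv n pre_area
      if «case» = 0 then (p.2, p.1)
      else if «case» = 1 then (p.1, p.2 + pre_length)
      else if «case» = 2 then (p.1 + pre_length, p.2 + pre_length)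
      else (2 * pre_length - p.2 - 1, pre_length - p.1 - 1)

def calXY (level : Int) (n : Int) : Int × Int := calXY_go level.toNat n

-- ===== PORT B =====
def calXY_alt (level : Int) (n : Int) : Int × Int :=
  (PySem.List.pyRange 1 (level + 1) 1).foldl (fun (xy : Int × Int) k =>
      let length : Int := 1 <<< (k - 1).toNat    -- 1 << (k-1); k ≥ 1 throughout the range
      let area := length * length
      let c0 := PySem.Int.floordiv n area
      let c := if k < level then PySem.Int.mod c0 4 else c0
      if c = 0 then (xy.2, xy.1)
      else if c = 1 then (xy.1, xy.2 + length)
      else if c = 2 then (xy.1 + length, xy.2 + length)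
      else (2 * length - xy.2 - 1, length - xy.1 - 1)) (0, 0)

-- ===== PRECONDITION & SPEC =====
-- Pre_ excludes exactly negative level, where A computes 1 << (level - 1) with a negative
-- shift count and raises ValueError.
def Pre_calXY (level : Int) (n : Int) : Prop := 0 ≤ level
instance (level : Int) (n : Int) : Decidable (Pre_calXY level n) := by unfold Pre_calXY; infer_instance
def pvWitness_calXY : Int × Int := (3, 29)

def Spec_calXY (level : Int) (n : Int) (out : Int × Int) : Prop := out = calXY_alt level n
instance (level : Int) (n : Int) (out : Int × Int) : Decidable (Spec_calXY level n out) := by unfold Spec_calXY; infer_instance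

-- ===== CLAIM (what is proved, stated in full; the proofs are below) =====
def Claim_equal_calXY : Prop := ∀ (level : Int) (n : Int), Dom_calXY level n → Pre_calXY level n → Spec_calXY level n (calXY level n)

-- ===== LEMMAS AND PROOFS =====

-- the digit B extracts at an inner position i agrees with what A's nested remainders leave
theorem pv_digit (n : Int) (i m : Nat) (h : i < m) :
    n % (4 : Int) ^ m / 4 ^ i % 4 = n / 4 ^ i % 4 := by
  have h4i : ((4 : Int) ^ i) ≠ 0 := by positivity
  have hsplit : (4 : Int) ^ m = 4 ^ (m - i - 1) * 4 ^ i * 4 := by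
    rw [mul_assoc, ← pow_succ, ← pow_add]
    congr 1
    omega
  rw [Int.emod_def n ((4 : Int) ^ m), hsplit]
  have : n - 4 ^ (m - i - 1) * 4 ^ i * 4 * (n / (4 ^ (m - i - 1) * 4 ^ i * 4)) =
      n + (-(4 ^ (m - i - 1) * 4 * (n / (4 ^ (m - i - 1) * 4 ^ i * 4)))) * 4 ^ i := by ring
  rw [this, Int.add_mul_ediv_right _ _ h4i]
  have : n / 4 ^ i + -(4 ^ (m - i - 1) * 4 * (n / (4 ^ (m - i - 1) * 4 ^ i * 4))) =
      n / 4 ^ i + (-(4 ^ (m - i - 1) * (n / (4 ^ (m - i - 1) * 4 ^ i * 4)))) * 4 := by ring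
  rw [this]
  generalize hq : (-(4 ^ (m - i - 1) * (n / (4 ^ (m - i - 1) * 4 ^ i * 4)))) = q
  generalize ha : n / 4 ^ i = a
  omega

theorem pv_main (L : Nat) (n : Int) :
    calXY_go L n = calXY_alt (L : Int) n := by
  induction L generalizing n with
  | zero =>
    simp [calXY_go, calXY_alt]
  | succ L ih =>
    have hsh : ∀ m : Nat, ((1 <<< m : Nat) : Int) * ((1 <<< m : Nat) : Int) = 4 ^ m := by
      intro m
      rw [Nat.shiftLeft_eq, one_mul]
      push_cast
      rw [← pow_add, ← two_mul, pow_mul]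
      norm_num
    rw [Nat.cast_add, Nat.cast_one]
    unfold calXY_alt
    rw [PySem.List.pyRange_one_succ_right (by omega : (1 : Int) ≤ (L : Int) + 1),
      List.foldl_append]
    -- inner fold: the first L iterations at level L+1 with n equal the whole fold at level L with n % 4^L
    have hinner :
        (PySem.List.pyRange 1 ((L : Int) + 1) 1).foldl
          (fun (xy : Int × Int) k =>
            let length : Int := 1 <<< (k - 1).toNat
            let area := length * length
            let c0 := PySem.Int.floordiv n area
            let c := if k < ((L : Int) + 1) then PySem.Int.mod c0 4 else c0
            if c = 0 then (xy.2, xy.1)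
            else if c = 1 then (xy.1, xy.2 + length)
            else if c = 2 then (xy.1 + length, xy.2 + length)
            else (2 * length - xy.2 - 1, length - xy.1 - 1)) (0, 0)
        = calXY_alt (L : Int) (PySem.Int.mod n ((1 <<< L) * (1 <<< L))) := by
      unfold calXY_alt
      apply PySem.List.foldl_congr_mem
      intro acc k hk
      have hk' := (PySem.List.mem_pyRange_one).1 hk
      obtain ⟨i, rfl⟩ : ∃ i : Nat, k = (i : Int) + 1 := ⟨(k - 1).toNat, by omega⟩
      have hiL : i < L := by omega
      have htn : ((i : Int) + 1 - 1).toNat = i := by omega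
      have hlt : ((i : Int) + 1) < (L : Int) + 1 := by exact_mod_cast by omega
      simp only [htn, if_pos hlt, hsh]
      have harea : (0 : Int) < 4 ^ i := by positivity
      have hareaL : (0 : Int) < 4 ^ L := by positivity
      have hc : (if (i : Int) + 1 < (L : Int) then
            PySem.Int.mod (PySem.Int.floordiv (PySem.Int.mod n ((4 : Int) ^ L)) (4 ^ i)) 4
          else PySem.Int.floordiv (PySem.Int.mod n ((4 : Int) ^ L)) (4 ^ i))
          = PySem.Int.mod (PySem.Int.floordiv n ((4 : Int) ^ i)) 4 := by
        have h4 : (0 : Int) < 4 := by norm_num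
        rw [PySem.Int.mod_eq_emod_of_pos hareaL, PySem.Int.floordiv_eq_ediv_of_pos harea,
          PySem.Int.floordiv_eq_ediv_of_pos harea, PySem.Int.mod_eq_emod_of_pos h4]
        by_cases hi' : (i : Int) + 1 < (L : Int)
        · rw [if_pos hi', PySem.Int.mod_eq_emod_of_pos h4]
          exact pv_digit n i L hiL
        · rw [if_neg hi', PySem.Int.mod_eq_emod_of_pos h4]
          have hmodpos : 0 ≤ n % (4 : Int) ^ L := Int.emod_nonneg n (by positivity)
          have hmodlt : n % (4 : Int) ^ L < 4 ^ L := Int.emod_lt_of_pos n hareaL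
          have hdivpos : 0 ≤ n % (4 : Int) ^ L / 4 ^ i := Int.ediv_nonneg hmodpos (by positivity)
          have hdivlt : n % (4 : Int) ^ L / 4 ^ i < 4 := by
            apply Int.ediv_lt_of_lt_mul (by positivity)
            calc n % (4 : Int) ^ L < 4 ^ L := hmodlt
              _ ≤ 4 * 4 ^ i := by
                  rw [← pow_succ']
                  exact pow_le_pow_right₀ (by norm_num) (by omega)
          rw [← pv_digit n i L hiL, Int.emod_eq_of_lt hdivpos hdivlt]
      rw [hc]
    rw [hinner]
    simp only [calXY_go, List.foldl_cons, List.foldl_nil]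
    rw [ih]
    have htn2 : ((L : Int) + 1 - 1).toNat = L := by omega
    simp only [htn2, lt_irrefl, if_false]

-- ===== VERDICT (by name: the statement is the Claim_ definition above) =====
theorem calXY_spec : Claim_equal_calXY := by
  intro level n _ hpre
  unfold Pre_calXY at hpre
  obtain ⟨L, rfl⟩ : ∃ L : Nat, level = (L : Int) := ⟨level.toNat, by omega⟩
  unfold Spec_calXY calXY
  rw [Int.toNat_natCast, pv_main]
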